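-- pv_equiv track=rewrite | github.com/55TFSI/RKGE | Model_Training.py | assign_meta_path_between_a_pair
-- ===== SOURCE A (Python) =====
-- def  assign_meta_path_between_a_pair(paths):
--     UIUI = []
--     UIAI = []
--     UIDI = []
--     UIGI = []
--     for path in paths:
--         sign = path[2]
--         if sign.startswith('u'):
--             UIUI.append(path)
--         elif sign.startswith('a'):
--             UIAI.append(path)
--         elif sign.startswith('d'):
--             UIDI.append(path)
--         else:
--             UIGI.append(path)
--     return UIUI,UIAI,UIDI,UIGI
-- ===== SOURCE B (Python) =====
-- def assign_meta_path_between_a_pair(paths):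
--     UIUI = [p for p in paths if p[2].startswith('u')]
--     UIAI = [p for p in paths if p[2].startswith('a')]
--     UIDI = [p for p in paths if p[2].startswith('d')]
--     UIGI = [p for p in paths if not (p[2].startswith('u') or p[2].startswith('a') or p[2].startswith('d'))]
--     return UIUI, UIAI, UIDI, UIGI
-- ===== Notes on version B (the rewrite author's own statement) =====
-- stated objective: idiomatic
-- what changed: Replaces the single accumulating loop with an if/elif chain by four independent list comprehensions, one filtering pass per output bucket (prefixes 'u'/'a'/'d' are mutually exclusive, so no chain is needed).
import Mathlib
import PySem

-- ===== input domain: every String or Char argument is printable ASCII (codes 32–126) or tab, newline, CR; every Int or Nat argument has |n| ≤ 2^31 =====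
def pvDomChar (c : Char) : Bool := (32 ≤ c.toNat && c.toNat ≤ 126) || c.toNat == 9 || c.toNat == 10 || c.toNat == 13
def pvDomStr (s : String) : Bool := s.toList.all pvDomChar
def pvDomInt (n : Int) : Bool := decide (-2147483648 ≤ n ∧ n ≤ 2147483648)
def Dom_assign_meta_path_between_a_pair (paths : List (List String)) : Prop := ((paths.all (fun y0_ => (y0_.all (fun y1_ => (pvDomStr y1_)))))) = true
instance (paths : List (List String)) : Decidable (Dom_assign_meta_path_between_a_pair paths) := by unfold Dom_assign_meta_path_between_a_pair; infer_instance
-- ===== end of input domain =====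

-- B replaces A's single accumulating loop by four independent filtering passes (one comprehension per bucket); idiomatic, same cost.


-- ===== PORT A =====
-- sign = path[2]; Pre_ guarantees the index is in range, so the getD default is never used inside Pre_.
def pvSignA (path : List String) : String := (PySem.List.pyGet? path 2).getD ""

def pvStepA (st : List (List String) × List (List String) × List (List String) × List (List String))
    (path : List String) :
    List (List String) × List (List String) × List (List String) × List (List String) :=
  let sign := pvSignA path
  if PySem.Str.startswith sign "u" then (st.1 ++ [path], st.2.1, st.2.2.1, st.2.2.2)
  else if PySem.Str.startswith sign "a" then (st.1, st.2.1 ++ [path], st.2.2.1, st.2.2.2)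
  else if PySem.Str.startswith sign "d" then (st.1, st.2.1, st.2.2.1 ++ [path], st.2.2.2)
  else (st.1, st.2.1, st.2.2.1, st.2.2.2 ++ [path])

def assign_meta_path_between_a_pair (paths : List (List String)) : List (List String) × List (List String) × List (List String) × List (List String) :=
  paths.foldl pvStepA ([], [], [], [])

-- ===== PORT B =====
def pvSignB (path : List String) : String := (PySem.List.pyGet? path 2).getD ""

def assign_meta_path_between_a_pair_alt (paths : List (List String)) : List (List String) × List (List String) × List (List String) × List (List String) :=
  (paths.filter (fun p => PySem.Str.startswith (pvSignB p) "u"),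
   paths.filter (fun p => PySem.Str.startswith (pvSignB p) "a"),
   paths.filter (fun p => PySem.Str.startswith (pvSignB p) "d"),
   paths.filter (fun p => !(PySem.Str.startswith (pvSignB p) "u" || PySem.Str.startswith (pvSignB p) "a" || PySem.Str.startswith (pvSignB p) "d")))

-- ===== PRECONDITION & SPEC =====
-- Pre_ excludes paths shorter than 3 elements: there A raises IndexError on path[2] (and so does B).
def Pre_assign_meta_path_between_a_pair (paths : List (List String)) : Prop :=
  ∀ p ∈ paths, 3 ≤ p.length
instance (paths : List (List String)) : Decidable (Pre_assign_meta_path_between_a_pair paths) := by unfold Pre_assign_meta_path_between_a_pair; infer_instance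

def pvWitness_assign_meta_path_between_a_pair : List (List String) :=
  [["u1", "i1", "u2"], ["u1", "i1", "a3"], ["u1", "i1", "g9"]]

def Spec_assign_meta_path_between_a_pair (paths : List (List String)) (out : List (List String) × List (List String) × List (List String) × List (List String)) : Prop := out = assign_meta_path_between_a_pair_alt paths
instance (paths : List (List String)) (out : List (List String) × List (List String) × List (List String) × List (List String)) : Decidable (Spec_assign_meta_path_between_a_pair paths out) := by unfold Spec_assign_meta_path_between_a_pair; infer_instance

-- ===== CLAIM (what is proved, stated in full; the proofs are below) =====
def Claim_equal_assign_meta_path_between_a_pair : Prop := ∀ (paths : List (List String)), Dom_assign_meta_path_between_a_pair paths → Pre_assign_meta_path_between_a_pair paths → Spec_assign_meta_path_between_a_pair paths (assign_meta_path_between_a_pair paths)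

-- ===== LEMMAS AND PROOFS =====

-- a one-character prefix determines the first character, so two distinct ones exclude each other
theorem pv_sw_excl {l : List Char} {c d : Char} (hcd : c ≠ d)
    (h : PySem.Chars.startswith l [c] = true) :
    PySem.Chars.startswith l [d] = false := by
  rw [PySem.Chars.startswith_iff] at h
  obtain ⟨t, ht⟩ := h
  subst ht
  rw [Bool.eq_false_iff]
  intro h2
  rw [PySem.Chars.startswith_iff] at h2
  obtain ⟨t2, ht2⟩ := h2
  simp at ht2
  exact hcd (ht2.1.symm)

theorem pv_fold_eq (paths : List (List String))
    (u a d g : List (List String)) :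
    paths.foldl pvStepA (u, a, d, g) =
      (u ++ paths.filter (fun p => PySem.Str.startswith (pvSignB p) "u"),
       a ++ paths.filter (fun p => PySem.Str.startswith (pvSignB p) "a"),
       d ++ paths.filter (fun p => PySem.Str.startswith (pvSignB p) "d"),
       g ++ paths.filter (fun p => !(PySem.Str.startswith (pvSignB p) "u" || PySem.Str.startswith (pvSignB p) "a" || PySem.Str.startswith (pvSignB p) "d"))) := by
  induction paths generalizing u a d g with
  | nil => simp
  | cons p rest ih =>
    have hsign : pvSignA p = pvSignB p := rfl
    simp only [List.foldl_cons, List.filter_cons]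
    by_cases hu : PySem.Chars.startswith (pvSignB p).toList ['u'] = true
    · have ha : PySem.Chars.startswith (pvSignB p).toList ['a'] = false := pv_sw_excl (by decide) hu
      have hd : PySem.Chars.startswith (pvSignB p).toList ['d'] = false := pv_sw_excl (by decide) hu
      simp [pvStepA, hsign, hu, ha, hd, ih]
    · by_cases ha : PySem.Chars.startswith (pvSignB p).toList ['a'] = true
      · have hd : PySem.Chars.startswith (pvSignB p).toList ['d'] = false := pv_sw_excl (by decide) ha
        simp [pvStepA, hsign, hu, ha, hd, ih]
      · by_cases hd : PySem.Chars.startswith (pvSignB p).toList ['d'] = true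
        · simp [pvStepA, hsign, hu, ha, hd, ih]
        · simp [pvStepA, hsign, hu, ha, hd, ih]

-- ===== VERDICT (by name: the statement is the Claim_ definition above) =====
theorem assign_meta_path_between_a_pair_spec : Claim_equal_assign_meta_path_between_a_pair := by
  intro paths _ _
  show assign_meta_path_between_a_pair paths = assign_meta_path_between_a_pair_alt paths
  simpa [assign_meta_path_between_a_pair_alt] using
    pv_fold_eq paths [] [] [] []
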